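-- pv_equiv track=rewrite | github.com/MinChul-Son/for-Coding-Test | naver_f.py | solution
-- ===== SOURCE A (Python) =====
-- def solution(id_list, k):
--     answer = 0
--
--     purchase_dict = dict()
--
--     for customers in id_list:
--         today_list = []
--         for customer in customers.split(" "):
--             if customer in today_list:
--                 continue
--
--             if customer not in purchase_dict:
--                 purchase_dict[customer] = 1
--                 answer += 1
--                 today_list.append(customer)
--                 continue
--
--             if purchase_dict[customer] < k:
--                 answer += 1
--                 purchase_dict[customer] += 1
--                 today_list.append(customer)
--
--     return answer
-- ===== SOURCE B (Python) =====
-- def solution(id_list, k):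
--     # Transposed algorithm: precompute each day's customer set once, then for each
--     # customer (on first sight) count across ALL days how many day-sets contain it,
--     # capped at k by a closed min() instead of A's incremental capped dict counting.
--     day_sets = [set(cs.split(" ")) for cs in id_list]
--     seen = set()
--     total = 0
--     for s in day_sets:
--         for c in s:
--             if c not in seen:
--                 seen.add(c)
--                 total += min(k, sum(1 for d in day_sets if c in d))
--     return total
-- ===== Notes on version B (the rewrite author's own statement) =====
-- stated objective: alternative
-- what changed: B transposes the computation: it precomputes each day's customer set once, then for each first-seen customer counts across ALL day-sets how many contain it and adds a closed min(k, days) - a per-customer-over-days scan with the cap as a formula, instead of A's single pass with an incrementally capped purchase dict and a linearly scanned today_list.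
-- intended difference: On k = 0 with a non-empty id_list, A still counts each customer's first-ever purchase (its new-customer branch ignores the cap), returning the number of distinct customers; B returns 0, the intended value when the per-customer cap is 0. — e.g. on solution(["a"], 0): A returns 1, B returns 0
-- outside the precondition, e.g. on solution(['a b'], -2): A returns 2, B returns -4
import Mathlib
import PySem

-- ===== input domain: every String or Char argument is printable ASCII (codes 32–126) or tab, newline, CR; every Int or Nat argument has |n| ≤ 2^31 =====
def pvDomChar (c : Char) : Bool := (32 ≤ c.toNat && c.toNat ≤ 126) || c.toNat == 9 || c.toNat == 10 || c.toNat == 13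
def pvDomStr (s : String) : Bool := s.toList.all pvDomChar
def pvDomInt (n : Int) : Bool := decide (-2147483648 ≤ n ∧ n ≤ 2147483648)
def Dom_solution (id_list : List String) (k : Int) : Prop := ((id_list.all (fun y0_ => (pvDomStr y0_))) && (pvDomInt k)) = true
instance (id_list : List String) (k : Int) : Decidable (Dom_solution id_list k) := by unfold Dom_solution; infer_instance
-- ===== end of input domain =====

-- B transposes the computation: it precomputes each day's customer set, then counts, per first-seen
-- customer, the number of day-sets containing it, capped by a closed min(k, ·) — replacing A's inline
-- capped dict counting with its today_list scans.

-- ===== PORT A =====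
-- one token of one day of A's inner loop; state = (answer, purchase_dict, today_list)
def solutionStep (k : Int) (st : Int × PySem.Dict String Int × List String) (customer : String) :
    Int × PySem.Dict String Int × List String :=
  if customer ∈ st.2.2 then st
  else if ¬ st.2.1.contains customer then
    (st.1 + 1, st.2.1.insert customer 1, st.2.2 ++ [customer])
  else if st.2.1.getD customer 0 < k then
    (st.1 + 1, st.2.1.insert customer (st.2.1.getD customer 0 + 1), st.2.2 ++ [customer])
  else st

def solution (id_list : List String) (k : Int) : Int :=
  (id_list.foldl
    (fun (st : Int × PySem.Dict String Int) customers =>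
      let r := ((PySem.Str.split? customers " ").getD []).foldl (solutionStep k) (st.1, st.2, [])
      (r.1, r.2.1))
    (0, PySem.Dict.empty)).1

-- ===== PORT B =====
-- day_sets = [set(cs.split(" ")) for cs in id_list]
def daySetsOf (id_list : List String) : List (PySem.Set String) :=
  id_list.map (fun cs => PySem.Set.ofList ((PySem.Str.split? cs " ").getD []))

-- sum(1 for d in day_sets if c in d)
def countDays (daySets : List (PySem.Set String)) (c : String) : Int :=
  daySets.foldl (fun n d => if PySem.Set.contains d c then n + 1 else n) 0

def solution_alt (id_list : List String) (k : Int) : Int :=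
  ((daySetsOf id_list).foldl
    (fun (st : PySem.Set String × Int) s =>
      s.foldl
        (fun (st : PySem.Set String × Int) c =>
          if PySem.Set.contains st.1 c then st
          else (PySem.Set.add st.1 c, st.2 + min k (countDays (daySetsOf id_list) c)))
        st)
    (PySem.Set.empty, 0)).2

-- ===== PRECONDITION & SPEC =====
-- Pre_ restricts k to the task's natural domain (a purchase cap is a count, so 0 ≤ k);
-- for negative k A returns 1 per distinct customer while B returns negative sums — neither is meaningful.
def Pre_solution (id_list : List String) (k : Int) : Prop := 0 ≤ k
instance (id_list : List String) (k : Int) : Decidable (Pre_solution id_list k) := by unfold Pre_solution; infer_instance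
def pvWitness_solution : List String × Int := (["a b", "a c"], 1)

-- On k = 0 with a non-empty id_list, A still counts each customer's first-ever purchase (its
-- new-customer branch ignores the cap), returning the number of distinct customers; B returns 0,
-- the intended value when the per-customer cap is 0.
def D_solution (id_list : List String) (k : Int) : Prop := k = 0 ∧ id_list ≠ []
instance (id_list : List String) (k : Int) : Decidable (D_solution id_list k) := by unfold D_solution; infer_instance
def Spec_solution (id_list : List String) (k : Int) (out : Int) : Prop := ¬ D_solution id_list k → out = solution_alt id_list k
instance (id_list : List String) (k : Int) (out : Int) : Decidable (Spec_solution id_list k out) := by unfold Spec_solution; infer_instance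
def pvDiffWitness_solution : List String × Int := (["a"], 0)
def pvDiffWitnessOut_solution : Int × Int := (1, 0)

-- ===== CLAIM (what is proved, stated in full; the proofs are below) =====
def Claim_unchanged_solution : Prop := ∀ (id_list : List String) (k : Int), Dom_solution id_list k → Pre_solution id_list k → Spec_solution id_list k (solution id_list k)
def Claim_changed_solution : Prop := Dom_solution (pvDiffWitness_solution.1) (pvDiffWitness_solution.2) ∧ Pre_solution (pvDiffWitness_solution.1) (pvDiffWitness_solution.2) ∧ D_solution (pvDiffWitness_solution.1) (pvDiffWitness_solution.2) ∧ solution (pvDiffWitness_solution.1) (pvDiffWitness_solution.2) = pvDiffWitnessOut_solution.1 ∧ solution_alt (pvDiffWitness_solution.1) (pvDiffWitness_solution.2) = pvDiffWitnessOut_solution.2 ∧ pvDiffWitnessOut_solution.1 ≠ pvDiffWitnessOut_solution.2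
def Claim_exact_solution : Prop := ∀ (id_list : List String) (k : Int), Dom_solution id_list k → Pre_solution id_list k → D_solution id_list k → solution id_list k ≠ solution_alt id_list k

-- ===== LEMMAS AND PROOFS =====

-- the effect of one DISTINCT token of a day on (answer, purchase_dict): A's step with today_list erased
def dayA (k : Int) (p : Int × PySem.Dict String Int) (c : String) : Int × PySem.Dict String Int :=
  if ¬ p.2.contains c then (p.1 + 1, p.2.insert c 1)
  else if p.2.getD c 0 < k then (p.1 + 1, p.2.insert c (p.2.getD c 0 + 1))
  else p

-- the value a day gives c's purchase count, given its value before the day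
def newVal (k : Int) : Option Int → Option Int
  | none => some 1
  | some v => if v < k then some (v + 1) else some v

-- "c is saturated in d" (its cap is already reached)
def satB (k : Int) (d : PySem.Dict String Int) (c : String) : Bool :=
  match d.get? c with
  | some v => decide (k ≤ v)
  | none => false

theorem dayA_get? (k : Int) (p : Int × PySem.Dict String Int) (c x : String) :
    ((dayA k p c).2).get? x = if x = c then newVal k (p.2.get? c) else p.2.get? x := by
  unfold dayA newVal
  rw [PySem.Dict.contains_eq_isSome_get?]
  rcases hc : p.2.get? c with _ | v
  · simp [PySem.Dict.get?_insert]
  · have hD : p.2.getD c 0 = v := by rw [PySem.Dict.getD_eq_get?_getD, hc]; rfl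
    by_cases hv : v < k
    · simp [hD, hv, PySem.Dict.get?_insert]
    · simp [hD, hv]
      intro h; subst h; exact hc

theorem dayA_fold_get? (k : Int) (S : List String) (hS : S.Nodup) (p : Int × PySem.Dict String Int) (x : String) :
    ((S.foldl (dayA k) p).2).get? x =
      if x ∈ S then newVal k (p.2.get? x) else p.2.get? x := by
  induction S generalizing p with
  | nil => simp
  | cons c S' ih =>
    obtain ⟨hcS', hS'⟩ := List.nodup_cons.mp hS
    simp only [List.foldl_cons, ih hS', dayA_get?, List.mem_cons]
    by_cases hxc : x = c
    · subst hxc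
      simp [hcS']
    · by_cases hxS : x ∈ S' <;> simp [hxc, hxS]

theorem dayA_fst (k : Int) (p : Int × PySem.Dict String Int) (c : String) :
    (dayA k p c).1 = if p.2.contains c = true then (if p.2.getD c 0 < k then p.1 + 1 else p.1) else p.1 + 1 := by
  unfold dayA
  by_cases h : p.2.contains c = true
  · rw [if_neg (not_not_intro h), if_pos h]
    split_ifs <;> rfl
  · rw [if_pos h, if_neg h]

theorem dayA_fst_le (k : Int) (p : Int × PySem.Dict String Int) (c : String) :
    p.1 ≤ (dayA k p c).1 := by
  unfold dayA; split_ifs <;> simp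

theorem dayA_fold_fst_le (k : Int) (S : List String) (p : Int × PySem.Dict String Int) :
    p.1 ≤ (S.foldl (dayA k) p).1 := by
  induction S generalizing p with
  | nil => simp
  | cons c S' ih => exact le_trans (dayA_fst_le k p c) (ih _)

theorem day_lemma (k : Int) (tokens : List String) (S : List String) (hS : S.Nodup)
    (a : Int) (d : PySem.Dict String Int) :
    tokens.foldl (solutionStep k)
      ((S.foldl (dayA k) (a, d)).1, (S.foldl (dayA k) (a, d)).2, S.filter (fun c => ! satB k d c)) =
    (((PySem.Set.update S tokens).foldl (dayA k) (a, d)).1,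
     ((PySem.Set.update S tokens).foldl (dayA k) (a, d)).2,
     (PySem.Set.update S tokens).filter (fun c => ! satB k d c)) := by
  induction tokens generalizing S with
  | nil => simp [PySem.Set.update]
  | cons t ts ih =>
    have hupd : PySem.Set.update S (t :: ts) = PySem.Set.update (PySem.Set.add S t) ts := by
      simp [PySem.Set.update]
    rw [hupd, List.foldl_cons]
    by_cases htS : t ∈ S
    · have hadd : PySem.Set.add S t = S := by
        simp [PySem.Set.add, PySem.Set.contains, htS]
      rw [hadd]
      have hstep : solutionStep k
          ((S.foldl (dayA k) (a, d)).1, (S.foldl (dayA k) (a, d)).2,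
            S.filter (fun c => ! satB k d c)) t =
          ((S.foldl (dayA k) (a, d)).1, (S.foldl (dayA k) (a, d)).2,
            S.filter (fun c => ! satB k d c)) := by
        simp only [solutionStep]
        by_cases hsat : satB k d t = true
        · have hget : ((S.foldl (dayA k) (a, d)).2).get? t = newVal k (d.get? t) := by
            rw [dayA_fold_get? k S hS]; simp [htS]
          rcases hv : d.get? t with _ | v
          · simp [satB, hv] at hsat
          · have hkv : k ≤ v := by simpa [satB, hv] using hsat
            have hget' : ((S.foldl (dayA k) (a, d)).2).get? t = some v := by
              rw [hget, hv]; simp [newVal]; omega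
            have hcon : ((S.foldl (dayA k) (a, d)).2).contains t = true := by
              rw [PySem.Dict.contains_eq_isSome_get?, hget']; rfl
            have hD : ((S.foldl (dayA k) (a, d)).2).getD t 0 = v := by
              rw [PySem.Dict.getD_eq_get?_getD, hget']; rfl
            have hmem : t ∉ S.filter (fun c => ! satB k d c) := by
              simp [List.mem_filter, hsat]
            simp [hmem, hcon, hD]
            omega
        · have hmem : t ∈ S.filter (fun c => ! satB k d c) := by
            simp [List.mem_filter, htS, hsat]
          simp [hmem]
      rw [hstep]; exact ih S hS
    · have hadd : PySem.Set.add S t = S ++ [t] := by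
        simp [PySem.Set.add, PySem.Set.contains, htS]
      have hnd : (S ++ [t]).Nodup := by
        simp only [List.nodup_append, List.nodup_singleton]
        refine ⟨hS, trivial, ?_⟩
        intro a ha b hb h
        rw [List.mem_singleton] at hb
        exact htS (hb ▸ h ▸ ha)
      have hPfold : ((S ++ [t]).foldl (dayA k) (a, d)) = dayA k (S.foldl (dayA k) (a, d)) t := by
        rw [List.foldl_append]; rfl
      have hget : ((S.foldl (dayA k) (a, d)).2).get? t = d.get? t := by
        rw [dayA_fold_get? k S hS]; simp [htS]
      have htf : t ∉ S.filter (fun c => ! satB k d c) := by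
        intro h; exact htS (List.mem_of_mem_filter h)
      have hstep : solutionStep k
          ((S.foldl (dayA k) (a, d)).1, (S.foldl (dayA k) (a, d)).2,
            S.filter (fun c => ! satB k d c)) t =
          (((S ++ [t]).foldl (dayA k) (a, d)).1, ((S ++ [t]).foldl (dayA k) (a, d)).2,
            (S ++ [t]).filter (fun c => ! satB k d c)) := by
        rw [hPfold]
        simp only [solutionStep, dayA]
        rw [PySem.Dict.contains_eq_isSome_get?, hget]
        rcases hv : d.get? t with _ | v
        · have hsat : satB k d t = false := by simp [satB, hv]
          simp [htf, List.filter_append, hsat]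
        · have hD : ((S.foldl (dayA k) (a, d)).2).getD t 0 = v := by
            rw [PySem.Dict.getD_eq_get?_getD, hget, hv]; rfl
          by_cases hvk : v < k
          · have hsat : satB k d t = false := by simp [satB, hv]; omega
            simp [htf, hD, hvk, List.filter_append, hsat]
          · have hsat : satB k d t = true := by simp [satB, hv]; omega
            simp [htf, hD, hvk, List.filter_append, hsat]
      rw [hstep, ← hadd] at *
      exact ih (PySem.Set.add S t) (hadd ▸ hnd)

-- the whole of A collapses to a single dayA-fold over the flattened per-day distinct-token stream
def tokenStream (id_list : List String) : List String :=
  id_list.flatMap (fun customers => PySem.Set.ofList ((PySem.Str.split? customers " ").getD []))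

theorem day_lemma_nil (k : Int) (tokens : List String) (a : Int) (d : PySem.Dict String Int) :
    tokens.foldl (solutionStep k) (a, d, []) =
      (((PySem.Set.ofList tokens).foldl (dayA k) (a, d)).1,
       ((PySem.Set.ofList tokens).foldl (dayA k) (a, d)).2,
       (PySem.Set.ofList tokens).filter (fun c => ! satB k d c)) := by
  have h := day_lemma k tokens [] (List.nodup_nil) a d
  simpa [PySem.Set.update_nil_left] using h

theorem solution_eq_fold (id_list : List String) (k : Int) :
    solution id_list k = ((tokenStream id_list).foldl (dayA k) (0, PySem.Dict.empty)).1 := by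
  unfold solution tokenStream
  rw [List.foldl_flatMap]
  have hfun : (fun (st : Int × PySem.Dict String Int) customers =>
      (let r := ((PySem.Str.split? customers " ").getD []).foldl (solutionStep k) (st.1, st.2, [])
       ((r.1, r.2.1) : Int × PySem.Dict String Int))) =
      (fun (st : Int × PySem.Dict String Int) customers =>
        (PySem.Set.ofList ((PySem.Str.split? customers " ").getD [])).foldl (dayA k) st) := by
    funext st customers
    simp only [day_lemma_nil]
  rw [hfun]

theorem fold_char (k : Int) (hk : 1 ≤ k) (L : List String) :
    (L.foldl (dayA k) (0, PySem.Dict.empty)).1 =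
      ((PySem.Set.ofList L).map (fun c => min k ((L.count c : Nat) : Int))).sum ∧
    ∀ x, ((L.foldl (dayA k) (0, PySem.Dict.empty)).2).get? x =
      if x ∈ L then some (min k ((L.count x : Nat) : Int)) else none := by
  induction L using List.reverseRecOn with
  | nil => simp [PySem.Set.ofList]
  | append_singleton L c ih =>
    obtain ⟨ih1, ih2⟩ := ih
    rw [List.foldl_append]
    have hofL : PySem.Set.ofList (L ++ [c]) = PySem.Set.add (PySem.Set.ofList L) c := by
      rw [PySem.Set.ofList_eq_foldl, PySem.Set.ofList_eq_foldl, List.foldl_append]; rfl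
    have hn := ih2 c
    constructor
    · rw [hofL]
      by_cases hcL : c ∈ L
      · have hadd : PySem.Set.add (PySem.Set.ofList L) c = PySem.Set.ofList L := by
          have : c ∈ PySem.Set.ofList L := (PySem.Set.mem_ofList L c).mpr hcL
          simp [PySem.Set.add, PySem.Set.contains, this]
        rw [hadd]
        obtain ⟨l₁, l₂, hsplit⟩ := List.append_of_mem ((PySem.Set.mem_ofList L c).mpr hcL)
        have hnd : (PySem.Set.ofList L).Nodup := PySem.Set.nodup_ofList L
        rw [hsplit] at hnd
        have hc1 : c ∉ l₁ := by
          simp only [List.nodup_append, List.nodup_cons] at hnd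
          intro h; exact hnd.2.2 c h c (List.mem_cons_self) rfl
        have hc2 : c ∉ l₂ := by
          simp only [List.nodup_append, List.nodup_cons] at hnd
          exact hnd.2.1.1
        have hcnt : (L ++ [c]).count c = L.count c + 1 := by
          simp [List.count_append]
        have hm1 : l₁.map (fun x => min k (((L ++ [c]).count x : Nat) : Int)) =
            l₁.map (fun x => min k ((L.count x : Nat) : Int)) := by
          apply List.map_congr_left
          intro x hx
          have hxc : x ≠ c := fun h => hc1 (h ▸ hx)
          simp [List.count_append, Ne.symm hxc]
        have hm2 : l₂.map (fun x => min k (((L ++ [c]).count x : Nat) : Int)) =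
            l₂.map (fun x => min k ((L.count x : Nat) : Int)) := by
          apply List.map_congr_left
          intro x hx
          have hxc : x ≠ c := fun h => hc2 (h ▸ hx)
          simp [List.count_append, Ne.symm hxc]
        rw [hsplit, List.map_append, List.map_cons, List.sum_append, List.sum_cons, hm1, hm2, hcnt]
        rw [hsplit, List.map_append, List.map_cons, List.sum_append, List.sum_cons] at ih1
        have hget : ((L.foldl (dayA k) (0, PySem.Dict.empty)).2).get? c =
            some (min k ((L.count c : Nat) : Int)) := by rw [hn]; simp [hcL]
        have hcon : ((L.foldl (dayA k) (0, PySem.Dict.empty)).2).contains c = true := by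
          rw [PySem.Dict.contains_eq_isSome_get?, hget]; rfl
        have hD : ((L.foldl (dayA k) (0, PySem.Dict.empty)).2).getD c 0 =
            min k ((L.count c : Nat) : Int) := by
          rw [PySem.Dict.getD_eq_get?_getD, hget]; rfl
        simp only [List.foldl_cons, List.foldl_nil]
        rw [dayA_fst, hcon, if_pos rfl, hD]
        by_cases hlt : min k ((L.count c : Nat) : Int) < k
        · rw [if_pos hlt, ih1]; push_cast; omega
        · rw [if_neg hlt, ih1]; push_cast; omega
      · have hadd : PySem.Set.add (PySem.Set.ofList L) c = PySem.Set.ofList L ++ [c] := by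
          have : c ∉ PySem.Set.ofList L := fun h => hcL ((PySem.Set.mem_ofList L c).mp h)
          simp [PySem.Set.add, PySem.Set.contains, this]
        rw [hadd]
        have hm1 : (PySem.Set.ofList L).map (fun x => min k (((L ++ [c]).count x : Nat) : Int)) =
            (PySem.Set.ofList L).map (fun x => min k ((L.count x : Nat) : Int)) := by
          apply List.map_congr_left
          intro x hx
          have hxc : x ≠ c := fun h => hcL (h ▸ (PySem.Set.mem_ofList L x).mp hx)
          simp [List.count_append, Ne.symm hxc]
        have hcnt : (L ++ [c]).count c = 1 := by
          simp [List.count_append, List.count_eq_zero.mpr hcL]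
        rw [List.map_append, List.map_cons, List.sum_append, List.sum_cons, hm1, hcnt]
        simp only [List.map_nil, List.sum_nil]
        have hget : ((L.foldl (dayA k) (0, PySem.Dict.empty)).2).get? c = none := by
          rw [hn]; simp [hcL]
        have hcon : ((L.foldl (dayA k) (0, PySem.Dict.empty)).2).contains c = false := by
          rw [PySem.Dict.contains_eq_isSome_get?, hget]; rfl
        simp only [List.foldl_cons, List.foldl_nil]
        rw [dayA_fst]
        have hcon' : ¬ (((L.foldl (dayA k) (0, PySem.Dict.empty)).2).contains c = true) := by
          rw [hcon]; simp
        rw [if_neg hcon', ih1]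
        push_cast
        omega
    · intro x
      simp only [List.foldl_cons, List.foldl_nil]
      rw [dayA_get?]
      by_cases hxc : x = c
      · subst hxc
        have hget := hn
        by_cases hxL : x ∈ L
        · rw [if_pos rfl, hget, if_pos hxL]
          have hcnt : (L ++ [x]).count x = L.count x + 1 := by
            simp [List.count_append]
          rw [hcnt]
          simp only [newVal]
          have hx' : x ∈ L ++ [x] := by simp
          rw [if_pos hx']
          by_cases hlt : min k ((L.count x : Nat) : Int) < k
          · rw [if_pos hlt]
            congr 1
            push_cast
            omega
          · rw [if_neg hlt]
            congr 1
            push_cast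
            omega
        · rw [if_pos rfl, hget, if_neg hxL]
          simp only [newVal]
          have hx' : x ∈ L ++ [x] := by simp
          rw [if_pos hx']
          have hcnt : (L ++ [x]).count x = 1 := by
            simp [List.count_append, List.count_eq_zero.mpr hxL]
          rw [hcnt]
          congr 1
          push_cast
          omega
      · rw [if_neg hxc, ih2 x]
        have hmem : (x ∈ L ++ [c]) ↔ (x ∈ L) := by
          simp [List.mem_append, hxc]
        have hcnt : (L ++ [c]).count x = L.count x := by
          simp [List.count_append, Ne.symm hxc]
        rw [hcnt]
        by_cases hxL : x ∈ L
        · rw [if_pos hxL, if_pos (hmem.mpr hxL)]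
        · rw [if_neg hxL, if_neg (fun h => hxL (hmem.mp h))]

-- B's dedup loop: folding "if new, add and pay F c" over a token list, starting from seen-set S,
-- adds exactly the new distinct elements, each paying F once
theorem dedup_fold (F : String → Int) (T : List String) :
    ∀ (S : PySem.Set String) (t : Int),
    T.foldl
      (fun (st : PySem.Set String × Int) c =>
        if PySem.Set.contains st.1 c then st else (PySem.Set.add st.1 c, st.2 + F c))
      (S, t) =
    (PySem.Set.update S T, t + (((PySem.Set.update S T).drop S.length).map F).sum) := by
  induction T with
  | nil =>
    intro S t
    have h : (PySem.Set.update S []).drop S.length = [] := by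
      simp [PySem.Set.update]
    simp [PySem.Set.update]
  | cons c T ih =>
    intro S t
    have hupd : PySem.Set.update S (c :: T) = PySem.Set.update (PySem.Set.add S c) T := by
      simp [PySem.Set.update]
    rw [List.foldl_cons]
    by_cases hc : c ∈ S
    · have hcon : PySem.Set.contains S c = true := by simp [hc]
      have hadd : PySem.Set.add S c = S := PySem.Set.add_of_mem hc
      rw [if_pos hcon, ih S t, hupd, hadd]
    · have hcon : ¬ PySem.Set.contains S c = true := fun h => hc (by simpa using h)
      have hadd : PySem.Set.add S c = S ++ [c] := PySem.Set.add_of_not_mem hc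
      rw [if_neg hcon, ih (PySem.Set.add S c) (t + F c), hupd, hadd]
      have hsplit : PySem.Set.update (S ++ [c]) T =
          (S ++ [c]) ++ (PySem.Set.ofList T).filter
            (fun y => !(PySem.Set.contains (S ++ [c]) y)) :=
        PySem.Set.update_eq_append_filter _ _
      have hdrop1 : (PySem.Set.update (S ++ [c]) T).drop (S ++ [c]).length =
          (PySem.Set.ofList T).filter (fun y => !(PySem.Set.contains (S ++ [c]) y)) := by
        rw [hsplit, List.drop_left]
      have hdrop2 : (PySem.Set.update (S ++ [c]) T).drop S.length =
          c :: (PySem.Set.ofList T).filter (fun y => !(PySem.Set.contains (S ++ [c]) y)) := by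
        rw [hsplit, List.append_assoc, List.drop_left, List.singleton_append]
      rw [hdrop1, hdrop2]
      simp only [List.map_cons, List.sum_cons]
      ring_nf

-- c is counted once in the token stream per day whose set contains it
theorem countDays_eq (id_list : List String) (c : String) :
    countDays (daySetsOf id_list) c = (((tokenStream id_list).count c : Nat) : Int) := by
  unfold countDays
  rw [PySem.List.foldl_count_if (fun d => PySem.Set.contains d c) (daySetsOf id_list) 0]
  rw [zero_add]
  congr 1
  induction id_list with
  | nil => rfl
  | cons cs rest ih =>
    have hstep : tokenStream (cs :: rest) =
        PySem.Set.ofList ((PySem.Str.split? cs " ").getD []) ++ tokenStream rest := by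
      simp [tokenStream]
    rw [daySetsOf, List.map_cons, List.countP_cons, hstep, List.count_append, ← daySetsOf, ih]
    by_cases hm : c ∈ PySem.Set.ofList ((PySem.Str.split? cs " ").getD [])
    · have h1 : (PySem.Set.ofList ((PySem.Str.split? cs " ").getD [])).count c = 1 :=
        List.count_eq_one_of_mem (PySem.Set.nodup_ofList _) hm
      have h2 : PySem.Set.contains (PySem.Set.ofList ((PySem.Str.split? cs " ").getD [])) c = true := by
        simp [hm]
      rw [h1, h2]
      simp
      omega
    · have h1 : (PySem.Set.ofList ((PySem.Str.split? cs " ").getD [])).count c = 0 :=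
        List.count_eq_zero.mpr hm
      have h2 : PySem.Set.contains (PySem.Set.ofList ((PySem.Str.split? cs " ").getD [])) c = false := by
        simp [hm]
      rw [h1, h2]
      simp

theorem alt_char (id_list : List String) (k : Int) :
    solution_alt id_list k =
      ((PySem.Set.ofList (tokenStream id_list)).map
        (fun c => min k (((tokenStream id_list).count c : Nat) : Int))).sum := by
  unfold solution_alt
  have hflat : (daySetsOf id_list).foldl
      (fun (st : PySem.Set String × Int) s =>
        s.foldl
          (fun (st : PySem.Set String × Int) c =>
            if PySem.Set.contains st.1 c then st
            else (PySem.Set.add st.1 c, st.2 + min k (countDays (daySetsOf id_list) c)))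
          st)
      (PySem.Set.empty, 0) =
      (tokenStream id_list).foldl
        (fun (st : PySem.Set String × Int) c =>
          if PySem.Set.contains st.1 c then st
          else (PySem.Set.add st.1 c, st.2 + min k (countDays (daySetsOf id_list) c)))
        (PySem.Set.empty, 0) := by
    rw [daySetsOf, List.foldl_map, tokenStream, List.foldl_flatMap]
  rw [hflat, dedup_fold (fun c => min k (countDays (daySetsOf id_list) c)) (tokenStream id_list)
        PySem.Set.empty 0]
  have hempty : PySem.Set.update PySem.Set.empty (tokenStream id_list) =
      PySem.Set.ofList (tokenStream id_list) := PySem.Set.update_nil_left _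
  rw [hempty]
  simp only [PySem.Set.empty, List.length_nil, List.drop_zero, zero_add]
  congr 1
  apply List.map_congr_left
  intro c _
  rw [countDays_eq]

-- ===== VERDICT (by name: the statement is the Claim_ definition above) =====
theorem solution_spec : Claim_unchanged_solution := by
  intro id_list k _ hpre
  unfold Spec_solution
  intro hnD
  rcases id_list with _ | ⟨cs, rest⟩
  · rfl
  · have hk : 1 ≤ k := by
      unfold D_solution at hnD
      unfold Pre_solution at hpre
      simp at hnD
      omega
    rw [solution_eq_fold, (fold_char k hk _).1, alt_char]

theorem solution_changed : Claim_changed_solution := by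
  unfold Claim_changed_solution; decide

theorem go_len (sep : List Char) (fuel : Nat) : ∀ (s cur : List Char) (acc : List (List Char)),
    acc.length < (PySem.Chars.splitOn.go sep fuel s cur acc).length := by
  induction fuel with
  | zero =>
    intro s cur acc
    simp [PySem.Chars.splitOn.go]
  | succ fuel ih =>
    intro s cur acc
    cases s with
    | nil => simp [PySem.Chars.splitOn.go]
    | cons ch rest =>
      rw [PySem.Chars.splitOn.go]
      split_ifs with h
      · have := ih (List.drop sep.length (ch :: rest)) [] (cur.reverse :: acc)
        simp at this
        omega
      · exact ih rest (ch :: cur) acc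

theorem tokens_ne_nil (s : String) : (PySem.Str.split? s " ").getD [] ≠ [] := by
  have h : PySem.Str.split? s " " =
      some ((PySem.Chars.splitOn s.toList [' ']).map String.ofList) := rfl
  rw [h, Option.getD_some]
  intro hnil
  have hlen := go_len [' '] (s.toList.length + 1) s.toList [] []
  rw [List.map_eq_nil_iff] at hnil
  rw [PySem.Chars.splitOn] at hnil
  rw [hnil] at hlen
  simp at hlen

theorem tokenStream_ne_nil (cs : String) (rest : List String) : tokenStream (cs :: rest) ≠ [] := by
  unfold tokenStream
  simp only [List.flatMap_cons]
  intro h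
  rcases List.append_eq_nil_iff.mp h with ⟨h1, -⟩
  rcases hx : (PySem.Str.split? cs " ").getD [] with _ | ⟨y, ys⟩
  · exact tokens_ne_nil cs hx
  · have hy : y ∈ PySem.Set.ofList ((PySem.Str.split? cs " ").getD []) := by
      refine (PySem.Set.mem_ofList _ y).mpr ?_
      rw [hx]
      exact List.mem_cons_self
    rw [h1] at hy
    exact (List.not_mem_nil).elim hy

theorem solution_tight : Claim_exact_solution := by
  intro id_list k _ _ hD
  obtain ⟨hk0, hne⟩ := hD
  subst hk0
  have hB : solution_alt id_list 0 = 0 := by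
    rw [alt_char]
    apply List.sum_eq_zero
    intro v hv
    simp only [List.mem_map] at hv
    obtain ⟨x, hx, hvx⟩ := hv
    have hxL : x ∈ tokenStream id_list := (PySem.Set.mem_ofList _ x).mp hx
    have hpos : 0 < (tokenStream id_list).count x := List.count_pos_iff.mpr hxL
    have h1 : (1 : Int) ≤ (((tokenStream id_list).count x : Nat) : Int) := by exact_mod_cast hpos
    rw [← hvx]
    omega
  rw [hB, solution_eq_fold]
  rcases id_list with _ | ⟨cs, rest⟩
  · exact absurd rfl hne
  · rcases hL : tokenStream (cs :: rest) with _ | ⟨t, L'⟩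
    · exact absurd hL (tokenStream_ne_nil cs rest)
    · rw [List.foldl_cons]
      have h1 : dayA 0 (0, PySem.Dict.empty) t = (1, PySem.Dict.empty.insert t 1) := by
        unfold dayA
        simp [PySem.Dict.contains_empty]
      rw [h1]
      have hle := dayA_fold_fst_le 0 L' (1, PySem.Dict.empty.insert t 1)
      intro heq
      rw [heq] at hle
      simp at hle
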